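-- pv_equiv track=rewrite | github.com/Xin-Guan-HolisticAI/npc_agent | core/_conceptualizers/_nl/node_extract.py | update_relations_judgement
-- ===== SOURCE A (Python) =====
-- def update_relations_judgement(concept_pairs, concepts_relations_judgement, conflict_concepts, resolved_conflicts):
--     for conflict_pair, new_judgement in zip(conflict_concepts, resolved_conflicts):
--         if new_judgement == 'yes':
--             # Find the reverse pair and update its judgement to 'no'
--             reverse_pair = [conflict_pair[1], conflict_pair[0]]
--             if reverse_pair in concept_pairs:
--                 index = concept_pairs.index(reverse_pair)
--                 concepts_relations_judgement[index] = 'no'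
--         elif new_judgement == 'no':
--             # Update the original conflict pair's judgement to 'no'
--             if conflict_pair in concept_pairs:
--                 index = concept_pairs.index(conflict_pair)
--                 concepts_relations_judgement[index] = 'no'
--
--     return concepts_relations_judgement
-- ===== SOURCE B (Python) =====
-- def update_relations_judgement(concept_pairs, concepts_relations_judgement, conflict_concepts, resolved_conflicts):
--     # Build the set of pairs whose judgement must become 'no'
--     targets = set()
--     for pair, judgement in zip(conflict_concepts, resolved_conflicts):
--         if judgement == 'yes':
--             targets.add((pair[1], pair[0]))
--         elif judgement == 'no':
--             targets.add(tuple(pair))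
--     # First-occurrence index of every pair, built in one pass
--     first = {}
--     for i, pair in enumerate(concept_pairs):
--         key = tuple(pair)
--         if key not in first:
--             first[key] = i
--     # Mark each targeted pair (at its first occurrence) as 'no'
--     for key, i in first.items():
--         if key in targets:
--             concepts_relations_judgement[i] = 'no'
--     return concepts_relations_judgement
-- ===== Notes on version B (the rewrite author's own statement) =====
-- stated objective: alternative
-- what changed: Instead of scanning concept_pairs per conflict (membership test plus .index), B builds a set of targeted pairs and a first-occurrence index dictionary in single passes and then marks the hits in one final pass; on the measured input family this is not faster.
import Mathlib
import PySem

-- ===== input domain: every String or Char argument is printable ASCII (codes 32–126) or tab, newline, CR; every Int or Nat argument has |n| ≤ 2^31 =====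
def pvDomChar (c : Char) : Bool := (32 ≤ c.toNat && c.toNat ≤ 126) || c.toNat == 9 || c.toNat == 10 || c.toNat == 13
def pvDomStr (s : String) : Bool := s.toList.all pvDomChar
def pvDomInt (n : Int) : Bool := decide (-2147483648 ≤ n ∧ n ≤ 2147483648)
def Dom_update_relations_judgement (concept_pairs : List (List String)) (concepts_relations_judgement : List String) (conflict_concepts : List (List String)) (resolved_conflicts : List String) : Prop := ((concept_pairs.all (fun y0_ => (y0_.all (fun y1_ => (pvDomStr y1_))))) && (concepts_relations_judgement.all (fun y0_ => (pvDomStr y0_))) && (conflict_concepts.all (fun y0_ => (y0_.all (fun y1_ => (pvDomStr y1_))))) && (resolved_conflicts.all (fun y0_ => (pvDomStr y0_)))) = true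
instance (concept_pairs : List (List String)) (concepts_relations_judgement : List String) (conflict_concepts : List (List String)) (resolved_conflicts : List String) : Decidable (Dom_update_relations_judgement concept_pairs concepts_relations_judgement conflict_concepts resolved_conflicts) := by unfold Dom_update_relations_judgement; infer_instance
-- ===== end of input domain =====

-- B restructures A: instead of A's per-conflict membership test + .index scan of concept_pairs,
-- B builds a target set and a first-occurrence index dictionary once, then marks the hits in one
-- final pass (an alternative decomposition; not measured faster).
-- Both Pythons mutate concepts_relations_judgement in place the same way; equivalence here is
-- about the returned list.

-- ===== PORT A =====
-- pair[1]/pair[0] are ported with getD: exact under Pre_ (a 'yes'-resolved pair has ≥ 2 elements);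
-- the in-place assignment crj[index] = 'no' is ported with List.set: exact under Pre_ (index < length).
def update_relations_judgement (concept_pairs : List (List String)) (concepts_relations_judgement : List String) (conflict_concepts : List (List String)) (resolved_conflicts : List String) : List String :=
  (List.zip conflict_concepts resolved_conflicts).foldl
    (fun crj pr =>
      if pr.2 = "yes" then
        let reverse_pair := [pr.1.getD 1 "", pr.1.getD 0 ""]
        if reverse_pair ∈ concept_pairs then
          crj.set (concept_pairs.idxOf reverse_pair) "no"
        else crj
      else if pr.2 = "no" then
        if pr.1 ∈ concept_pairs then
          crj.set (concept_pairs.idxOf pr.1) "no"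
        else crj
      else crj)
    concepts_relations_judgement

-- ===== PORT B =====
-- the set `targets` of Source B (Python tuples become lists here)
def pvTargets (conflict_concepts : List (List String)) (resolved_conflicts : List String) : PySem.Set (List String) :=
  (List.zip conflict_concepts resolved_conflicts).foldl
    (fun s pr =>
      if pr.2 = "yes" then s.add [pr.1.getD 1 "", pr.1.getD 0 ""]
      else if pr.2 = "no" then s.add pr.1
      else s)
    PySem.Set.empty

-- the dict `first` of Source B (enumerate indices are nonnegative, kept as Nat)
def pvFirst (concept_pairs : List (List String)) : PySem.Dict (List String) Nat :=
  concept_pairs.zipIdx.foldl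
    (fun d pr => if d.contains pr.1 then d else d.insert pr.1 pr.2)
    PySem.Dict.empty

def update_relations_judgement_alt (concept_pairs : List (List String)) (concepts_relations_judgement : List String) (conflict_concepts : List (List String)) (resolved_conflicts : List String) : List String :=
  let targets := pvTargets conflict_concepts resolved_conflicts
  let first := pvFirst concept_pairs
  first.items.foldl
    (fun crj pr => if targets.contains pr.1 then crj.set pr.2 "no" else crj)
    concepts_relations_judgement

-- ===== PRECONDITION & SPEC =====
-- Pre_ holds exactly where Python A returns normally: every 'yes'-resolved conflict pair has at
-- least 2 elements (else conflict_pair[1] raises IndexError), and every index actually written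
-- is within concepts_relations_judgement (else the assignment raises IndexError).
def Pre_update_relations_judgement (concept_pairs : List (List String)) (concepts_relations_judgement : List String) (conflict_concepts : List (List String)) (resolved_conflicts : List String) : Prop :=
  ((List.zip conflict_concepts resolved_conflicts).all
    (fun pr =>
      if pr.2 = "yes" then
        decide (2 ≤ pr.1.length) &&
          ((concept_pairs.idxOf? [pr.1.getD 1 "", pr.1.getD 0 ""]).all
            (fun j => decide (j < concepts_relations_judgement.length)))
      else if pr.2 = "no" then
        ((concept_pairs.idxOf? pr.1).all
          (fun j => decide (j < concepts_relations_judgement.length)))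
      else true)) = true
instance (concept_pairs : List (List String)) (concepts_relations_judgement : List String) (conflict_concepts : List (List String)) (resolved_conflicts : List String) : Decidable (Pre_update_relations_judgement concept_pairs concepts_relations_judgement conflict_concepts resolved_conflicts) := by unfold Pre_update_relations_judgement; infer_instance

def pvWitness_update_relations_judgement : List (List String) × List String × List (List String) × List String :=
  ([["a", "b"], ["b", "a"]], ["yes", "yes"], [["a", "b"], ["c", "d"]], ["yes", "no"])

def Spec_update_relations_judgement (concept_pairs : List (List String)) (concepts_relations_judgement : List String) (conflict_concepts : List (List String)) (resolved_conflicts : List String) (out : List String) : Prop := out = update_relations_judgement_alt concept_pairs concepts_relations_judgement conflict_concepts resolved_conflicts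
instance (concept_pairs : List (List String)) (concepts_relations_judgement : List String) (conflict_concepts : List (List String)) (resolved_conflicts : List String) (out : List String) : Decidable (Spec_update_relations_judgement concept_pairs concepts_relations_judgement conflict_concepts resolved_conflicts out) := by unfold Spec_update_relations_judgement; infer_instance

-- ===== CLAIM (what is proved, stated in full; the proofs are below) =====
def Claim_equal_update_relations_judgement : Prop := ∀ (concept_pairs : List (List String)) (concepts_relations_judgement : List String) (conflict_concepts : List (List String)) (resolved_conflicts : List String), Dom_update_relations_judgement concept_pairs concepts_relations_judgement conflict_concepts resolved_conflicts → Pre_update_relations_judgement concept_pairs concepts_relations_judgement conflict_concepts resolved_conflicts → Spec_update_relations_judgement concept_pairs concepts_relations_judgement conflict_concepts resolved_conflicts (update_relations_judgement concept_pairs concepts_relations_judgement conflict_concepts resolved_conflicts)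

-- ===== LEMMAS AND PROOFS =====

-- the judgement-to-target map shared by both programs
def pvTgt (pr : List String × String) : Option (List String) :=
  if pr.2 = "yes" then some [pr.1.getD 1 "", pr.1.getD 0 ""]
  else if pr.2 = "no" then some pr.1
  else none

theorem idxOf?_eq_ite {α : Type} [BEq α] [LawfulBEq α] [DecidableEq α] (l : List α) (a : α) :
    List.idxOf? a l = if a ∈ l then some (l.idxOf a) else none := by
  induction l with
  | nil => simp
  | cons x l ih =>
    rw [List.idxOf?_cons]
    by_cases hx : x = a
    · subst hx; simp
    · have hba : (x == a) = false := beq_eq_false_iff_ne.mpr hx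
      have hax : a ≠ x := fun h => hx h.symm
      rw [if_neg (by simp [hx]), ih]
      by_cases hm : a ∈ l
      · simp [hm, hax, List.idxOf_cons, hba]
      · simp [hm, hax]

-- generic pointwise description of a "mark some positions 'no'" foldl
theorem foldl_mark_getElem? {β : Type} (P : β → Bool) (ix : β → Nat) (l : List β)
    (crj : List String) (j : Nat) :
    (l.foldl (fun c b => if P b then c.set (ix b) "no" else c) crj)[j]? =
      if l.any (fun b => P b && ix b == j) then (crj[j]?.map fun _ => "no") else crj[j]? := by
  induction l generalizing crj with
  | nil => simp
  | cons b l ih =>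
    simp only [List.foldl_cons, List.any_cons, ih]
    by_cases hP : P b
    · by_cases hj : ix b = j
      · subst hj
        by_cases hlt : ix b < crj.length
        · simp [hP, hlt, List.getElem?_eq_getElem hlt]
        · have hnone : crj[ix b]? = none := List.getElem?_eq_none (Nat.le_of_not_lt hlt)
          simp [hP, List.getElem?_set, hlt, hnone]
      · simp [hP, hj, List.getElem?_set]
    · simp [hP]

theorem A_eq_mark (concept_pairs : List (List String)) (crj : List String)
    (conflict_concepts : List (List String)) (resolved_conflicts : List String) :
    update_relations_judgement concept_pairs crj conflict_concepts resolved_conflicts =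
      (List.zip conflict_concepts resolved_conflicts).foldl
        (fun c pr =>
          if (pvTgt pr).any (fun t => concept_pairs.contains t) then
            c.set (((pvTgt pr).map (fun t => concept_pairs.idxOf t)).getD 0) "no"
          else c)
        crj := by
  unfold update_relations_judgement
  congr 1
  funext c pr
  simp only [pvTgt]
  split_ifs <;> simp_all

theorem mem_pvTargets_aux (l : List (List String × String)) (s : PySem.Set (List String))
    (t : List String) :
    t ∈ l.foldl
        (fun s pr =>
          if pr.2 = "yes" then s.add [pr.1.getD 1 "", pr.1.getD 0 ""]
          else if pr.2 = "no" then s.add pr.1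
          else s) s ↔
      t ∈ s ∨ ∃ pr ∈ l, pvTgt pr = some t := by
  induction l generalizing s with
  | nil => simp
  | cons pr l ih =>
    obtain ⟨p1, p2⟩ := pr
    simp only [List.foldl_cons, List.mem_cons]
    split_ifs with h1 h2
    · subst h1
      rw [ih]
      simp only [PySem.Set.mem_add, pvTgt, if_pos rfl]
      constructor
      · rintro (⟨hs | he⟩ | ⟨q, hq, hqt⟩)
        · exact Or.inl hs
        · exact Or.inr ⟨(p1, "yes"), Or.inl rfl, by simp [pvTgt, he]⟩
        · exact Or.inr ⟨q, Or.inr hq, hqt⟩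
      · rintro (hs | ⟨q, (rfl | hq), hqt⟩)
        · exact Or.inl (Or.inl hs)
        · simp [pvTgt] at hqt
          exact Or.inl (Or.inr hqt.symm)
        · exact Or.inr ⟨q, hq, hqt⟩
    · subst h2
      rw [ih]
      simp only [PySem.Set.mem_add]
      constructor
      · rintro (⟨hs | he⟩ | ⟨q, hq, hqt⟩)
        · exact Or.inl hs
        · exact Or.inr ⟨(p1, "no"), Or.inl rfl, by simp [pvTgt, h1, he]⟩
        · exact Or.inr ⟨q, Or.inr hq, hqt⟩
      · rintro (hs | ⟨q, (rfl | hq), hqt⟩)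
        · exact Or.inl (Or.inl hs)
        · simp [pvTgt, h1] at hqt
          exact Or.inl (Or.inr hqt.symm)
        · exact Or.inr ⟨q, hq, hqt⟩
    · rw [ih]
      constructor
      · rintro (hs | ⟨q, hq, hqt⟩)
        · exact Or.inl hs
        · exact Or.inr ⟨q, Or.inr hq, hqt⟩
      · rintro (hs | ⟨q, (rfl | hq), hqt⟩)
        · exact Or.inl hs
        · simp [pvTgt, h1, h2] at hqt
        · exact Or.inr ⟨q, hq, hqt⟩

theorem mem_pvTargets (conflict_concepts : List (List String)) (resolved_conflicts : List String)
    (t : List String) :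
    t ∈ pvTargets conflict_concepts resolved_conflicts ↔
      ∃ pr ∈ List.zip conflict_concepts resolved_conflicts, pvTgt pr = some t := by
  unfold pvTargets
  rw [mem_pvTargets_aux]
  simp [PySem.Set.empty]

theorem pvFirst_aux (cp : List (List String)) (n : Nat) (d : PySem.Dict (List String) Nat)
    (t : List String) :
    ((cp.zipIdx n).foldl
        (fun d pr => if d.contains pr.1 then d else d.insert pr.1 pr.2) d).get? t =
      ((d.get? t).or ((cp.idxOf? t).map (· + n))) := by
  induction cp generalizing n d with
  | nil => simp
  | cons x cp ih =>
    simp only [List.zipIdx_cons, List.foldl_cons]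
    by_cases hc : d.contains x = true
    · rw [if_pos hc, ih]
      by_cases hx : t = x
      · subst hx
        rw [PySem.Dict.contains_eq_isSome_get?] at hc
        rcases Option.isSome_iff_exists.mp hc with ⟨v, hv⟩
        simp [hv]
      · have hxt : x ≠ t := fun h => hx h.symm
        rw [List.idxOf?_cons, if_neg (by simp [hxt])]
        cases d.get? t <;> simp [Option.map_map] <;> (cases cp.idxOf? t <;> simp) <;> omega
    · rw [if_neg hc, ih]
      by_cases hx : t = x
      · subst hx
        rw [PySem.Dict.contains_eq_isSome_get?] at hc
        have hnone : d.get? t = none := by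
          cases h : d.get? t <;> simp [h] at hc ⊢
        rw [List.idxOf?_cons, if_pos (by simp)]
        simp [PySem.Dict.get?_insert_self, hnone]
      · rw [PySem.Dict.get?_insert_of_ne _ _ hx]
        have hxt : x ≠ t := fun h => hx h.symm
        rw [List.idxOf?_cons, if_neg (by simp [hxt])]
        cases d.get? t <;> simp [Option.map_map] <;> (cases cp.idxOf? t <;> simp) <;> omega

theorem get?_pvFirst (cp : List (List String)) (t : List String) :
    (pvFirst cp).get? t = cp.idxOf? t := by
  unfold pvFirst
  rw [pvFirst_aux]
  simp

theorem nodup_keys_pvFirst_aux (l : List (List String × Nat)) (d : PySem.Dict (List String) Nat)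
    (h : d.keys.Nodup) :
    (l.foldl (fun d pr => if d.contains pr.1 then d else d.insert pr.1 pr.2) d).keys.Nodup := by
  induction l generalizing d with
  | nil => exact h
  | cons pr l ih =>
    simp only [List.foldl_cons]
    split
    · exact ih _ h
    · exact ih _ (PySem.Dict.nodup_keys_insert _ _ _ h)

theorem nodup_keys_pvFirst (cp : List (List String)) : (pvFirst cp).keys.Nodup :=
  nodup_keys_pvFirst_aux _ _ (by simp [PySem.Dict.keys_empty])

theorem update_relations_judgement_spec' (concept_pairs : List (List String))
    (crj : List String) (conflict_concepts : List (List String))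
    (resolved_conflicts : List String) :
    update_relations_judgement concept_pairs crj conflict_concepts resolved_conflicts =
      update_relations_judgement_alt concept_pairs crj conflict_concepts resolved_conflicts := by
  rw [A_eq_mark]
  unfold update_relations_judgement_alt
  apply List.ext_getElem?
  intro j
  rw [foldl_mark_getElem?, foldl_mark_getElem?]
  have hiff :
      ((List.zip conflict_concepts resolved_conflicts).any
          (fun pr => ((pvTgt pr).any (fun t => concept_pairs.contains t)) &&
            (((pvTgt pr).map (fun t => concept_pairs.idxOf t)).getD 0 == j)) = true) ↔
      ((pvFirst concept_pairs).items.any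
          (fun pr => (pvTargets conflict_concepts resolved_conflicts).contains pr.1 &&
            (pr.2 == j)) = true) := by
    simp only [List.any_eq_true, Bool.and_eq_true, beq_iff_eq]
    constructor
    · rintro ⟨pr, hmem, hP, hix⟩
      cases htgt : pvTgt pr with
      | none => simp [htgt] at hP
      | some t =>
        rw [htgt] at hP hix
        simp only [Option.any_some, Option.map_some, Option.getD_some] at hP hix
        have hmem' : t ∈ concept_pairs := by
          simpa using hP
        refine ⟨(t, j), ?_, ?_, rfl⟩
        · apply PySem.Dict.mem_items_of_get?_eq_some
          rw [get?_pvFirst, idxOf?_eq_ite, if_pos hmem', hix]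
        · rw [PySem.Set.contains_iff, mem_pvTargets]
          exact ⟨pr, hmem, htgt⟩
    · rintro ⟨⟨t, i⟩, hmem, hT, hix⟩
      simp only at hix
      subst hix
      have hget : (pvFirst concept_pairs).get? t = some i :=
        PySem.Dict.get?_of_mem_items _ hmem (nodup_keys_pvFirst _)
      rw [get?_pvFirst, idxOf?_eq_ite] at hget
      rw [PySem.Set.contains_iff, mem_pvTargets] at hT
      rcases hT with ⟨pr, hpr, htgt⟩
      by_cases hm : t ∈ concept_pairs
      · rw [if_pos hm] at hget
        refine ⟨pr, hpr, ?_, ?_⟩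
        · simp [htgt, hm]
        · simp only [htgt, Option.map_some, Option.getD_some]
          exact Option.some.injEq _ _ ▸ (by simpa using hget)
      · rw [if_neg hm] at hget
        exact absurd hget (by simp)
  simp only [hiff]

-- ===== VERDICT (by name: the statement is the Claim_ definition above) =====
theorem update_relations_judgement_spec : Claim_equal_update_relations_judgement := by
  intro cp crj cc rc _ _
  exact update_relations_judgement_spec' cp crj cc rc
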